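-- pv_equiv track=rewrite | github.com/TonkoshkuraMisha/GPT | chess_kings.py | count_king_arrangements
-- ===== SOURCE A (Python) =====
-- def count_king_arrangements(board_size):
--     if board_size < 2:
--         return 0
--
--     total_arrangements = 0
--     for row1 in range(board_size):
--         for col1 in range(board_size):
--             for row2 in range(board_size):
--                 for col2 in range(board_size):
--                     if abs(row1 - row2) <= 1 and abs(col1 - col2) <= 1:
--                         continue  # Kings are attacking each other
--                     total_arrangements += 1
--
--     return total_arrangements
-- ===== SOURCE B (Python) =====
-- def count_king_arrangements(board_size):
--     # Closed form: ordered pairs of cells that are neither equal nor king-adjacent.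
--     # Total ordered 4-tuples n^4 minus attacking-or-same pairs, which factor as
--     # (# ordered coordinate pairs with |d|<=1)^2 = (3n-2)^2.
--     if board_size < 2:
--         return 0
--     n = board_size
--     return n ** 4 - (3 * n - 2) ** 2
-- ===== Notes on version B (the rewrite author's own statement) =====
-- stated objective: faster
-- what changed: Replaced the quadruple nested loop over all cell pairs with the closed form n^4 - (3n-2)^2, obtained by counting attacking-or-equal ordered pairs as a product of per-axis counts.
import Mathlib
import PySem

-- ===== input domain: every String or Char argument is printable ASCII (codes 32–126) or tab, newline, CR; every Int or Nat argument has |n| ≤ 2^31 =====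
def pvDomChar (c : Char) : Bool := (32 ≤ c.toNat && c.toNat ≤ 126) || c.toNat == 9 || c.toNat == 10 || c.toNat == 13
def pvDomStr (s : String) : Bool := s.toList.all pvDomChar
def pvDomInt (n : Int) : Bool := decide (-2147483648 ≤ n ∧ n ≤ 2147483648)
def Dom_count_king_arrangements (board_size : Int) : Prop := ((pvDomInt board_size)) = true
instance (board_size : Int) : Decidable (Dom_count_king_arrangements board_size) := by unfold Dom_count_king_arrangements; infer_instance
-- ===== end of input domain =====

-- B replaces A's O(n^4) quadruple loop by the closed form n^4 - (3n-2)^2 (same value everywhere).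

-- ===== PORT A =====
def count_king_arrangements (board_size : Int) : Int :=
  if board_size < 2 then 0
  else
    (PySem.List.pyRange 0 board_size 1).foldl (fun acc row1 =>
      (PySem.List.pyRange 0 board_size 1).foldl (fun acc col1 =>
        (PySem.List.pyRange 0 board_size 1).foldl (fun acc row2 =>
          (PySem.List.pyRange 0 board_size 1).foldl (fun acc col2 =>
            if |row1 - row2| ≤ 1 ∧ |col1 - col2| ≤ 1 then acc else acc + 1)
          acc) acc) acc) 0

-- ===== PORT B =====
def count_king_arrangements_alt (board_size : Int) : Int :=
  if board_size < 2 then 0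
  else board_size ^ 4 - (3 * board_size - 2) ^ 2

-- ===== PRECONDITION & SPEC =====
def Spec_count_king_arrangements (board_size : Int) (out : Int) : Prop := out = count_king_arrangements_alt board_size
instance (board_size : Int) (out : Int) : Decidable (Spec_count_king_arrangements board_size out) := by unfold Spec_count_king_arrangements; infer_instance

-- ===== CLAIM (what is proved, stated in full; the proofs are below) =====
def Claim_equal_count_king_arrangements : Prop := ∀ (board_size : Int), Dom_count_king_arrangements board_size → Spec_count_king_arrangements board_size (count_king_arrangements board_size)

-- ===== LEMMAS AND PROOFS =====

-- 0/1 indicator of two coordinates being within distance 1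
def kaInd (x y : ℤ) : ℤ := if |x - y| ≤ 1 then 1 else 0

-- accumulator-additive folds are init + sum
theorem ka_foldl_acc_add (l : List ℤ) (h : ℤ → ℤ) (step : ℤ → ℤ → ℤ)
    (hs : ∀ a x, step a x = a + h x) (a : ℤ) :
    l.foldl step a = a + (l.map h).sum := by
  induction l generalizing a with
  | nil => simp
  | cons x xs ih => simp [List.foldl, hs, ih, add_assoc]

theorem ka_sum_list_range (f : ℕ → ℤ) (m : ℕ) :
    ((List.range m).map f).sum = ∑ k ∈ Finset.range m, f k := by
  induction m with
  | zero => simp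
  | succ m ih => simp [List.range_succ, Finset.sum_range_succ, ih]

-- the end-column count: only k = m-1 is within distance 1 of m among k < m
theorem ka_edge_sum (m : ℕ) :
    (∑ k ∈ Finset.range m, kaInd (m : ℤ) (k : ℤ)) = if m = 0 then 0 else 1 := by
  cases m with
  | zero => simp
  | succ m =>
    rw [Finset.sum_range_succ]
    have h0 : (∑ k ∈ Finset.range m, kaInd ((m + 1 : ℕ) : ℤ) (k : ℤ)) = 0 := by
      apply Finset.sum_eq_zero
      intro k hk
      have : k < m := Finset.mem_range.mp hk
      unfold kaInd
      rw [if_neg]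
      rw [abs_le]
      push_cast
      omega
    rw [h0]
    unfold kaInd
    rw [if_pos (by push_cast; rw [abs_le]; omega)]
    simp

theorem ka_ind_comm (x y : ℤ) : kaInd x y = kaInd y x := by
  unfold kaInd; rw [abs_sub_comm]

-- ordered pairs within distance 1 on one axis: 3m - 2 for m ≥ 1
theorem ka_axis_sum (m : ℕ) (hm : 1 ≤ m) :
    (∑ x ∈ Finset.range m, ∑ y ∈ Finset.range m, kaInd (x : ℤ) (y : ℤ)) = 3 * (m : ℤ) - 2 := by
  induction m with
  | zero => omega
  | succ m ih =>
    cases Nat.eq_or_lt_of_le hm with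
    | inl h =>
      have : m = 0 := by omega
      subst this
      decide
    | inr h =>
      have hm1 : 1 ≤ m := by omega
      rw [Finset.sum_range_succ]
      have hrow : (∑ y ∈ Finset.range (m + 1), kaInd ((m : ℕ) : ℤ) (y : ℤ)) =
          (∑ y ∈ Finset.range m, kaInd ((m : ℕ) : ℤ) (y : ℤ)) + kaInd (m : ℤ) (m : ℤ) :=
        Finset.sum_range_succ _ m
      have hinner : ∀ x, x ∈ Finset.range m →
          (∑ y ∈ Finset.range (m + 1), kaInd (x : ℤ) (y : ℤ)) =
          (∑ y ∈ Finset.range m, kaInd (x : ℤ) (y : ℤ)) + kaInd (x : ℤ) (m : ℤ) := by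
        intro x _; exact Finset.sum_range_succ _ m
      rw [Finset.sum_congr rfl hinner, Finset.sum_add_distrib, ih hm1, hrow]
      have hcol : (∑ x ∈ Finset.range m, kaInd (x : ℤ) (m : ℤ)) = 1 := by
        have := ka_edge_sum m
        rw [if_neg (by omega)] at this
        rw [← this]
        exact Finset.sum_congr rfl fun x _ => ka_ind_comm _ _
      rw [hcol, ka_edge_sum m, if_neg (by omega)]
      have : kaInd (m : ℤ) (m : ℤ) = 1 := by unfold kaInd; simp
      rw [this]
      push_cast
      ring

-- the quadruple fold of port A, as a closed form, for n ≥ 2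
theorem ka_fold_closed (n : ℤ) (hn : 2 ≤ n) :
    (PySem.List.pyRange 0 n 1).foldl (fun acc row1 =>
      (PySem.List.pyRange 0 n 1).foldl (fun acc col1 =>
        (PySem.List.pyRange 0 n 1).foldl (fun acc row2 =>
          (PySem.List.pyRange 0 n 1).foldl (fun acc col2 =>
            if |row1 - row2| ≤ 1 ∧ |col1 - col2| ≤ 1 then acc else acc + 1)
          acc) acc) acc) 0 = n ^ 4 - (3 * n - 2) ^ 2 := by
  set L := PySem.List.pyRange 0 n 1 with hL
  -- peel the four folds into nested sums
  have hstep0 : ∀ (r1 r2 c1 : ℤ) (a c2 : ℤ),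
      (if |r1 - r2| ≤ 1 ∧ |c1 - c2| ≤ 1 then a else a + 1) =
      a + (1 - kaInd r1 r2 * kaInd c1 c2) := by
    intro r1 r2 c1 a c2
    unfold kaInd
    by_cases h1 : |r1 - r2| ≤ 1 <;> by_cases h2 : |c1 - c2| ≤ 1 <;>
      simp [h1, h2]
  have h1 : ∀ (r1 c1 : ℤ) (a : ℤ),
      L.foldl (fun acc r2 => L.foldl (fun acc c2 =>
          if |r1 - r2| ≤ 1 ∧ |c1 - c2| ≤ 1 then acc else acc + 1) acc) a =
      a + (L.map (fun r2 => (L.map (fun c2 => 1 - kaInd r1 r2 * kaInd c1 c2)).sum)).sum := by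
    intro r1 c1 a
    apply ka_foldl_acc_add
    intro b r2
    apply ka_foldl_acc_add
    intro c c2
    exact hstep0 r1 r2 c1 c c2
  have h2 : ∀ (r1 : ℤ) (a : ℤ),
      L.foldl (fun acc c1 => L.foldl (fun acc r2 => L.foldl (fun acc c2 =>
          if |r1 - r2| ≤ 1 ∧ |c1 - c2| ≤ 1 then acc else acc + 1) acc) acc) a =
      a + (L.map (fun c1 => (L.map (fun r2 =>
          (L.map (fun c2 => 1 - kaInd r1 r2 * kaInd c1 c2)).sum)).sum)).sum := by
    intro r1 a
    apply ka_foldl_acc_add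
    intro b c1
    exact h1 r1 c1 b
  have h3 : L.foldl (fun acc row1 =>
      L.foldl (fun acc col1 => L.foldl (fun acc row2 => L.foldl (fun acc col2 =>
          if |row1 - row2| ≤ 1 ∧ |col1 - col2| ≤ 1 then acc else acc + 1) acc) acc) acc) 0 =
      (L.map (fun r1 => (L.map (fun c1 => (L.map (fun r2 =>
          (L.map (fun c2 => 1 - kaInd r1 r2 * kaInd c1 c2)).sum)).sum)).sum)).sum := by
    rw [ka_foldl_acc_add _ _ _ (fun a r1 => h2 r1 a) 0, zero_add]
  rw [h3]
  -- switch to Finset sums over naturals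
  set m := n.toNat with hm
  have hmn : (m : ℤ) = n := Int.toNat_of_nonneg (by omega)
  have hLr : L = (List.range m).map (fun k : ℕ => (k : ℤ)) := by
    rw [hL, PySem.List.pyRange_one]
    simp [hm]
  have hsum : ∀ (g : ℤ → ℤ), (L.map g).sum = ∑ k ∈ Finset.range m, g (k : ℤ) := by
    intro g
    rw [hLr, List.map_map]
    exact ka_sum_list_range _ m
  simp only [hsum]
  -- arithmetic on the quadruple Finset sum
  have hax : (∑ x ∈ Finset.range m, ∑ y ∈ Finset.range m, kaInd (x : ℤ) (y : ℤ)) =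
      3 * (m : ℤ) - 2 := ka_axis_sum m (by omega)
  have expand : (∑ r1 ∈ Finset.range m, ∑ c1 ∈ Finset.range m, ∑ r2 ∈ Finset.range m,
      ∑ c2 ∈ Finset.range m, (1 - kaInd (r1 : ℤ) (r2 : ℤ) * kaInd (c1 : ℤ) (c2 : ℤ))) =
      (m : ℤ) ^ 4 - (3 * (m : ℤ) - 2) ^ 2 := by
    simp only [Finset.sum_sub_distrib, Finset.sum_const, Finset.card_range, nsmul_eq_mul,
      mul_one, ← Finset.mul_sum, ← Finset.sum_mul]
    rw [hax]
    ring
  rw [expand, hmn]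

-- ===== VERDICT (by name: the statement is the Claim_ definition above) =====
theorem count_king_arrangements_spec : Claim_equal_count_king_arrangements := by
  intro n _
  unfold Spec_count_king_arrangements count_king_arrangements count_king_arrangements_alt
  by_cases h : n < 2
  · simp [h]
  · rw [if_neg h, if_neg h]
    exact ka_fold_closed n (by omega)
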